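-- pv_equiv track=rewrite | github.com/DigitalHolography/AngioEye | .github/scripts/pipeline_docs_latex_gen.py | pick_table_key_size
-- ===== SOURCE A (Python) =====
-- def code_font_size(value):
--     text = "" if value is None else str(value)
--     segments = []
--     for slash_part in text.split("/"):
--         segments.extend(piece for piece in slash_part.split("_") if piece)
--     max_segment_len = max((len(part) for part in segments), default=0)
--
--     if max_segment_len >= 30 or len(text) >= 95:
--         return r"\scriptsize"
--     if max_segment_len >= 22 or len(text) >= 70:
--         return r"\footnotesize"
--     return ""
--
-- def pick_table_key_size(values):
--     rank = {"": 0, r"\footnotesize": 1, r"\scriptsize": 2}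
--     max_rank = 0
--     for value in values:
--         size_cmd = code_font_size(value)
--         max_rank = max(max_rank, rank.get(size_cmd, 0))
--     for cmd, cmd_rank in rank.items():
--         if cmd_rank == max_rank:
--             return cmd
--     return ""
-- ===== SOURCE B (Python) =====
-- def pick_table_key_size(values):
--     # One pass accumulating two global maxima, classify once at the end.
--     gmax_seg = 0
--     gmax_len = 0
--     for value in values:
--         text = "" if value is None else str(value)
--         for slash_part in text.split("/"):
--             for piece in slash_part.split("_"):
--                 if piece:
--                     gmax_seg = max(gmax_seg, len(piece))
--         gmax_len = max(gmax_len, len(text))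
--     if gmax_seg >= 30 or gmax_len >= 95:
--         return r"\scriptsize"
--     if gmax_seg >= 22 or gmax_len >= 70:
--         return r"\footnotesize"
--     return ""
-- ===== Notes on version B (the rewrite author's own statement) =====
-- stated objective: simpler
-- what changed: B keeps two numeric global maxima (largest segment length, largest text length) in a single pass and applies the threshold ladder once at the end, eliminating per-value font-command classification, intermediate segment lists, the rank dictionary and the reverse-lookup loop over rank.items() (constant-factor speedup).
import Mathlib
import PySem

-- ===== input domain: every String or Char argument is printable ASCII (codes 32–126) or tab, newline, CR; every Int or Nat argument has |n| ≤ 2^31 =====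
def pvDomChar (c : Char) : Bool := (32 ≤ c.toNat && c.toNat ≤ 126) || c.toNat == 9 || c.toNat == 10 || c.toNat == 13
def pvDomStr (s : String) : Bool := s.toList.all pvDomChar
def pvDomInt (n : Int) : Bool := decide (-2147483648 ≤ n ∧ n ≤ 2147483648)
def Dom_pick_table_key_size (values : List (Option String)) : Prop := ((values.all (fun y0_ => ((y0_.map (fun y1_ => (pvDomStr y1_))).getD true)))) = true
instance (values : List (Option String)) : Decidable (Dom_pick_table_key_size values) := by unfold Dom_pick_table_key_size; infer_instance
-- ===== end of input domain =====

-- B replaces A's per-value font-command classification + rank dictionary + reverse lookup by two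
-- running numeric maxima and a single threshold ladder at the end (simpler decomposition, same cost).


-- shared helper: s.split(sep) for a non-empty literal sep (split? is none only for sep = "", so getD [] is exact here)
def pvSplit (s sep : String) : List String := (PySem.Str.split? s sep).getD []

-- ===== PORT A =====
-- code_font_size(value) with the None-handling already applied (text : String)
def pv_code_font_size (text : String) : String :=
  let segments : List String :=
    (pvSplit text "/").foldl
      (fun segs slash_part => segs ++ (pvSplit slash_part "_").filter (fun piece => piece != "")) []
  let max_segment_len : Int :=
    PySem.List.maxD (segments.map (fun part => PySem.Str.len part)) (fun x => x) 0
  if 30 ≤ max_segment_len ∨ 95 ≤ PySem.Str.len text then "\\scriptsize"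
  else if 22 ≤ max_segment_len ∨ 70 ≤ PySem.Str.len text then "\\footnotesize"
  else ""

def pv_rank : PySem.Dict String Int :=
  PySem.Dict.ofList [("", 0), ("\\footnotesize", 1), ("\\scriptsize", 2)]

-- the final 'for cmd, cmd_rank in rank.items(): if cmd_rank == max_rank: return cmd' loop
def pv_find_cmd : List (String × Int) → Int → String
  | [], _ => ""
  | (cmd, cmd_rank) :: rest, mr => if cmd_rank == mr then cmd else pv_find_cmd rest mr

def pick_table_key_size (values : List (Option String)) : String :=
  let max_rank : Int := values.foldl
    (fun mr value =>
      max mr (pv_rank.getD (pv_code_font_size (match value with | none => "" | some s => s)) 0)) 0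
  pv_find_cmd pv_rank.items max_rank

-- ===== PORT B =====
def pick_table_key_size_alt (values : List (Option String)) : String :=
  let st : Int × Int := values.foldl
    (fun st value =>
      let text := match value with | none => "" | some s => s
      let gseg := (pvSplit text "/").foldl
        (fun g slash_part =>
          (pvSplit slash_part "_").foldl
            (fun g piece => if piece != "" then max g (PySem.Str.len piece) else g) g) st.1
      (gseg, max st.2 (PySem.Str.len text))) (0, 0)
  if 30 ≤ st.1 ∨ 95 ≤ st.2 then "\\scriptsize"
  else if 22 ≤ st.1 ∨ 70 ≤ st.2 then "\\footnotesize"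
  else ""

-- ===== PRECONDITION & SPEC =====
def Spec_pick_table_key_size (values : List (Option String)) (out : String) : Prop := out = pick_table_key_size_alt values
instance (values : List (Option String)) (out : String) : Decidable (Spec_pick_table_key_size values out) := by unfold Spec_pick_table_key_size; infer_instance

-- ===== CLAIM (what is proved, stated in full; the proofs are below) =====
def Claim_equal_pick_table_key_size : Prop := ∀ (values : List (Option String)), Dom_pick_table_key_size values → Spec_pick_table_key_size values (pick_table_key_size values)

-- ===== LEMMAS AND PROOFS =====

def pvTxt (v : Option String) : String := match v with | none => "" | some s => s

-- B's inner fold over the '_'-pieces of one slash part, resp. over one whole text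
def pvG1 (g : Int) (sp : String) : Int :=
  (pvSplit sp "_").foldl (fun g piece => if piece != "" then max g (PySem.Str.len piece) else g) g
def pvG2 (g : Int) (text : String) : Int := (pvSplit text "/").foldl pvG1 g

-- the rank A assigns, as a ladder over (max segment len, text len)
def pvRkOf (s l : Int) : Int :=
  if 30 ≤ s ∨ 95 ≤ l then 2 else if 22 ≤ s ∨ 70 ≤ l then 1 else 0

theorem pv_len_nonneg (s : String) : 0 ≤ PySem.Str.len s := by
  simp [PySem.Str.len_eq]

theorem pv_foldl_max_shift {α : Type} (step : Int → α → Int)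
    (hs : ∀ (g h : Int) (x : α), step (max g h) x = max g (step h x)) :
    ∀ (xs : List α) (g h : Int), xs.foldl step (max g h) = max g (xs.foldl step h) := by
  intro xs
  induction xs with
  | nil => intro g h; rfl
  | cons x t ih => intro g h; simp only [List.foldl_cons, hs, ih]

theorem pvG1_shift (g h : Int) (sp : String) : pvG1 (max g h) sp = max g (pvG1 h sp) := by
  refine pv_foldl_max_shift _ ?_ _ g h
  intro g h x
  cases hx : (x != "") with
  | true => simp only [if_true, max_assoc]
  | false => simp only [Bool.false_eq_true, if_false]

theorem pvG2_shift (g h : Int) (t : String) : pvG2 (max g h) t = max g (pvG2 h t) := by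
  exact pv_foldl_max_shift pvG1 pvG1_shift _ g h

theorem pvG2_nonneg (g : Int) (t : String) (hg : 0 ≤ g) : 0 ≤ pvG2 g t := by
  have h := pvG2_shift g 0 t
  rw [max_eq_left hg] at h
  rw [h]; exact le_trans hg (le_max_left _ _)

-- fold with an 'if' guard = fold of the filtered, mapped list
theorem pvG1_eq_filter (sp : String) : ∀ g : Int,
    pvG1 g sp = (((pvSplit sp "_").filter (fun p => p != "")).map (fun p => PySem.Str.len p)).foldl max g := by
  unfold pvG1
  induction pvSplit sp "_" with
  | nil => intro g; rfl
  | cons x t ih =>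
    intro g
    simp only [List.foldl_cons, List.filter_cons]
    cases hx : (x != "") with
    | true => simp only [if_true, List.map_cons, List.foldl_cons]; exact ih _
    | false => simp only [Bool.false_eq_true, if_false]; exact ih _

theorem pv_maxD_id (xs : List Int) (h : ∀ x ∈ xs, 0 ≤ x) :
    PySem.List.maxD xs (fun x => x) 0 = xs.foldl max 0 := by
  cases xs with
  | nil => rfl
  | cons x t =>
    unfold PySem.List.maxD
    rw [PySem.List.max?_id_cons, Option.getD_some, List.foldl_cons,
        max_eq_right (h x (List.mem_cons_self))]

theorem pv_segs_fold (sps : List String) : ∀ acc : List String,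
    ((sps.foldl (fun segs sp => segs ++ (pvSplit sp "_").filter (fun p => p != "")) acc).map
        (fun part => PySem.Str.len part)).foldl max 0
    = sps.foldl pvG1 ((acc.map (fun part => PySem.Str.len part)).foldl max 0) := by
  induction sps with
  | nil => intro acc; rfl
  | cons sp t ih =>
    intro acc
    simp only [List.foldl_cons]
    rw [ih]
    congr 1
    rw [List.map_append, List.foldl_append, ← pvG1_eq_filter]

-- A's max_segment_len equals B's per-text segment maximum pvG2 0
theorem pv_msl_eq (text : String) :
    PySem.List.maxD
      (((pvSplit text "/").foldl
          (fun segs slash_part => segs ++ (pvSplit slash_part "_").filter (fun piece => piece != "")) []).map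
        (fun part => PySem.Str.len part)) (fun x => x) 0 = pvG2 0 text := by
  rw [pv_maxD_id]
  · exact pv_segs_fold (pvSplit text "/") []
  · rintro x hx
    rw [List.mem_map] at hx
    obtain ⟨p, -, rfl⟩ := hx
    exact pv_len_nonneg p

theorem pv_cfs_rank (text : String) :
    pv_rank.getD (pv_code_font_size text) 0 = pvRkOf (pvG2 0 text) (PySem.Str.len text) := by
  simp only [pv_code_font_size]
  unfold pvRkOf
  rw [pv_msl_eq]
  split_ifs <;> rfl

theorem pv_rkOf_max (a b c d : Int) :
    max (pvRkOf a b) (pvRkOf c d) = pvRkOf (max a c) (max b d) := by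
  unfold pvRkOf; split_ifs <;> omega

theorem pv_final (s l : Int) :
    pv_find_cmd pv_rank.items (pvRkOf s l) =
      (if 30 ≤ s ∨ 95 ≤ l then "\\scriptsize"
       else if 22 ≤ s ∨ 70 ≤ l then "\\footnotesize" else "") := by
  unfold pvRkOf
  split_ifs <;> rfl

theorem pv_main (values : List (Option String)) : ∀ (gs gl : Int), 0 ≤ gs → 0 ≤ gl →
    values.foldl
      (fun mr value => max mr (pv_rank.getD (pv_code_font_size (pvTxt value)) 0)) (pvRkOf gs gl)
    = pvRkOf (values.foldl (fun g v => pvG2 g (pvTxt v)) gs)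
             (values.foldl (fun g v => max g (PySem.Str.len (pvTxt v))) gl) := by
  induction values with
  | nil => intro gs gl _ _; rfl
  | cons v t ih =>
    intro gs gl hgs hgl
    simp only [List.foldl_cons]
    rw [pv_cfs_rank, pv_rkOf_max]
    have h2 : max gs (pvG2 0 (pvTxt v)) = pvG2 gs (pvTxt v) := by
      have h := pvG2_shift gs 0 (pvTxt v)
      rw [max_eq_left hgs] at h
      exact h.symm
    rw [h2]
    exact ih _ _ (pvG2_nonneg gs _ hgs) (le_trans hgl (le_max_left _ _))

-- B's pair fold, componentwise
theorem pv_bfold (values : List (Option String)) : ∀ (gs gl : Int),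
    values.foldl
      (fun st value =>
        let text := pvTxt value
        ((pvSplit text "/").foldl
          (fun g slash_part =>
            (pvSplit slash_part "_").foldl
              (fun g piece => if piece != "" then max g (PySem.Str.len piece) else g) g) st.1,
         max st.2 (PySem.Str.len text))) (gs, gl)
    = (values.foldl (fun g v => pvG2 g (pvTxt v)) gs,
       values.foldl (fun g v => max g (PySem.Str.len (pvTxt v))) gl) := by
  induction values with
  | nil => intro gs gl; rfl
  | cons v t ih => intro gs gl; simp only [List.foldl_cons]; exact ih _ _

-- ===== VERDICT (by name: the statement is the Claim_ definition above) =====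
theorem pick_table_key_size_spec : Claim_equal_pick_table_key_size := by
  intro values _
  unfold Spec_pick_table_key_size
  simp only [pick_table_key_size, pick_table_key_size_alt]
  have hmain := pv_main values 0 0 le_rfl le_rfl
  have h00 : pvRkOf 0 0 = 0 := rfl
  rw [h00] at hmain
  simp only [pvTxt] at hmain
  rw [hmain]
  have hb := pv_bfold values 0 0
  simp only [pvTxt] at hb
  rw [hb, pv_final]
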